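-- pv_equiv track=rewrite | github.com/pypi-data/pypi-mirror-21 | packages/pair/pair-0.1.1.tar.gz/pair-0.1.1/pair/match.py | make_entity_list
-- ===== SOURCE A (Python) =====
-- def make_entity_list(entities):
--     entity_list, mappings = list(), list()
--     i = 0
--     for entity in entities:
--         count = entities[entity]['count']
--         mappings += ([entity,] * count)
--         entity_list += range(i, i+count)
--         i += count
--     return entity_list, mappings
-- ===== SOURCE B (Python) =====
-- def make_entity_list(entities):
--     counts = [(k, p['count']) for k, p in entities.items() if p['count'] > 0]
--     total = sum(c for _, c in counts)
--
--     def owner(j):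
--         for k, c in counts:
--             if j < c:
--                 return k
--             j -= c
--
--     return list(range(total)), [owner(j) for j in range(total)]
-- ===== Notes on version B (the rewrite author's own statement) =====
-- stated objective: alternative
-- what changed: B is output-driven: it computes the total of positive counts, sets entity_list = range(total), and fills mappings by mapping each output index j to its owning entity via a cumulative-count walk, instead of A's input-driven pass that expands each entity count times while threading a running index.
import Mathlib
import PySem

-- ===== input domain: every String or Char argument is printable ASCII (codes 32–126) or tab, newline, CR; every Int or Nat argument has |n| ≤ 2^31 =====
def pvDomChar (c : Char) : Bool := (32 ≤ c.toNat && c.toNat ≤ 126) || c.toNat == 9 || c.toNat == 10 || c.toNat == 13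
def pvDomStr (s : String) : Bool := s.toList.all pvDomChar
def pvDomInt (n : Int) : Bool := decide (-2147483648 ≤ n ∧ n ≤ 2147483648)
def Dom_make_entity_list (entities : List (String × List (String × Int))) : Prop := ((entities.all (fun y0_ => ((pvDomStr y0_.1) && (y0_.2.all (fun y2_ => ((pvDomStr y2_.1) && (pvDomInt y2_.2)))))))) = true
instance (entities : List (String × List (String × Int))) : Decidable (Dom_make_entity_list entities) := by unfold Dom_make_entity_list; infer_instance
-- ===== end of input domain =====

-- B maps each output index j to its owning entity by a cumulative-count walk (output-driven),
-- instead of A's input-driven expansion with a running index accumulator (objective: alternative).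


-- shared helper: props['count'] / entities[entity]['count']'s inner lookup
-- (first match; default 0 is never reached inside Pre_, where 'count' is present)
def getCount (inner : List (String × Int)) : Int :=
  ((inner.find? (fun q => q.1 == "count")).map Prod.snd).getD 0

-- ===== PORT A =====
-- entities[entity]: first-match lookup in the association list (KeyError impossible:
-- entity is always a key of entities; the [] default is never reached)
def lookupA (entities : List (String × List (String × Int))) (k : String) : List (String × Int) :=
  ((entities.find? (fun q => q.1 == k)).map Prod.snd).getD []

def make_entity_list (entities : List (String × List (String × Int))) : List Int × List String :=
  let r := entities.foldl
    (fun (st : List Int × List String × Int) p =>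
      let entity := p.1
      let count := getCount (lookupA entities entity)
      (st.1 ++ PySem.List.pyRange st.2.2 (st.2.2 + count) 1,
       st.2.1 ++ PySem.List.pyRepeat [entity] count,
       st.2.2 + count))
    ([], [], 0)
  (r.1, r.2.1)

-- ===== PORT B =====
-- counts = [(k, p['count']) for k, p in entities.items() if p['count'] > 0]
def countsOf (entities : List (String × List (String × Int))) : List (String × Int) :=
  entities.filterMap (fun p => if 0 < getCount p.2 then some (p.1, getCount p.2) else none)

-- total = sum(c for _, c in counts)
def totalOf (counts : List (String × Int)) : Int :=
  counts.foldl (fun a q => a + q.2) 0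

-- owner(j): walk the (entity, count) pairs subtracting counts until j falls inside one.
-- Python falls off the end returning None for j outside [0, total); ported as Option.
def owner : List (String × Int) → Int → Option String
  | [], _ => none
  | (k, c) :: rest, j => if j < c then some k else owner rest (j - c)

-- the .getD "" default is unreachable for j in range(total) (all kept counts are positive),
-- matching Python, whose owner(j) always returns an entity there
def make_entity_list_alt (entities : List (String × List (String × Int))) : List Int × List String :=
  let counts := countsOf entities
  let total := totalOf counts
  (PySem.List.pyRange 0 total 1,
   (PySem.List.pyRange 0 total 1).map (fun j => (owner counts j).getD ""))

-- ===== PRECONDITION & SPEC =====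
-- Pre_ excludes: duplicate outer keys (not representable as a Python dict, so A's first-match
-- behaviour there is accidental), inner lists without a "count" key (A raises KeyError, and B
-- raises too), and a negative count followed by a later positive count (negative counts are
-- outside the natural domain of counts, and exactly there A's range arithmetic emits an index
-- list that does not index mappings).
def Pre_make_entity_list (entities : List (String × List (String × Int))) : Prop :=
  (entities.map Prod.fst).Nodup ∧
  (∀ p ∈ entities, p.2.any (fun q => q.1 == "count") = true) ∧
  entities.Pairwise (fun p q => getCount p.2 < 0 → getCount q.2 ≤ 0)
instance (entities : List (String × List (String × Int))) : Decidable (Pre_make_entity_list entities) := by unfold Pre_make_entity_list; infer_instance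

def pvWitness_make_entity_list : (List (String × List (String × Int))) :=
  [("a", [("count", 2)]), ("b", [("count", 1)])]

def Spec_make_entity_list (entities : List (String × List (String × Int))) (out : List Int × List String) : Prop := out = make_entity_list_alt entities
instance (entities : List (String × List (String × Int))) (out : List Int × List String) : Decidable (Spec_make_entity_list entities out) := by unfold Spec_make_entity_list; infer_instance

-- ===== CLAIM (what is proved, stated in full; the proofs are below) =====
def Claim_equal_make_entity_list : Prop := ∀ (entities : List (String × List (String × Int))), Dom_make_entity_list entities → Pre_make_entity_list entities → Spec_make_entity_list entities (make_entity_list entities)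

-- ===== LEMMAS AND PROOFS =====

-- proof-side characterisation of A's mappings: one flattening of replicates
def mkMappings (entities : List (String × List (String × Int))) : List String :=
  entities.flatMap (fun p => (PySem.List.pyRange 0 (getCount p.2) 1).map (fun _ => p.1))

-- proof-side expansion of a (key, count) list
def expand (counts : List (String × Int)) : List String :=
  counts.flatMap (fun q => List.replicate q.2.toNat q.1)

-- with nodup keys, first-match lookup of a member's key returns that member
lemma find?_of_nodup (l : List (String × List (String × Int))) :
    (l.map Prod.fst).Nodup → ∀ p ∈ l, l.find? (fun q => q.1 == p.1) = some p := by
  induction l with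
  | nil => intro _ p hp; cases hp
  | cons a t ih =>
    intro hnd p hp
    simp only [List.map_cons, List.nodup_cons] at hnd
    rcases List.mem_cons.mp hp with rfl | hp
    · simp [List.find?]
    · have hne : a.1 ≠ p.1 := by
        intro h
        exact hnd.1 (h ▸ (List.mem_map.mpr ⟨p, hp, rfl⟩))
      simp only [List.find?]
      rw [show (a.1 == p.1) = false from beq_eq_false_iff_ne.mpr hne]
      exact ih hnd.2 p hp

-- one entity's chunk is a replicate
lemma chunk_eq_replicate (x : String) (c : Int) :
    (PySem.List.pyRange 0 c 1).map (fun _ => x) = List.replicate c.toNat x := by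
  rw [List.map_const']
  simp [PySem.List.length_pyRange_one]

lemma mkMappings_cons (p : String × List (String × Int)) (l : List (String × List (String × Int))) :
    mkMappings (p :: l) = List.replicate (getCount p.2).toNat p.1 ++ mkMappings l := by
  simp only [mkMappings, List.flatMap_cons, chunk_eq_replicate]

-- the loop invariant of A's fold
lemma loopA (entities : List (String × List (String × Int))) :
    ∀ (l : List (String × List (String × Int))) (mp : List String),
    (∀ p ∈ l, entities.find? (fun q => q.1 == p.1) = some p) →
    (∀ p ∈ l, 0 ≤ getCount p.2) →
    l.foldl
      (fun (st : List Int × List String × Int) p =>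
        (st.1 ++ PySem.List.pyRange st.2.2 (st.2.2 + getCount (lookupA entities p.1)) 1,
         st.2.1 ++ PySem.List.pyRepeat [p.1] (getCount (lookupA entities p.1)),
         st.2.2 + getCount (lookupA entities p.1)))
      (PySem.List.pyRange 0 mp.length 1, mp, (mp.length : Int))
    = (PySem.List.pyRange 0 (mp ++ mkMappings l).length 1, mp ++ mkMappings l,
       ((mp ++ mkMappings l).length : Int)) := by
  intro l
  induction l with
  | nil => intro mp _ _; simp [mkMappings]
  | cons p t ih =>
    intro mp hl hc
    have hfind := hl p (List.mem_cons_self ..)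
    have hc0 : 0 ≤ getCount p.2 := hc p (List.mem_cons_self ..)
    have hlook : lookupA entities p.1 = p.2 := by simp [lookupA, hfind]
    simp only [List.foldl_cons, hlook]
    have hrep : PySem.List.pyRepeat [p.1] (getCount p.2) = List.replicate (getCount p.2).toNat p.1 :=
      PySem.List.pyRepeat_singleton ..
    have hlen : ((mp ++ List.replicate (getCount p.2).toNat p.1).length : Int)
        = (mp.length : Int) + getCount p.2 := by
      simp [List.length_append]; omega
    have hrange : PySem.List.pyRange 0 (mp.length : Int) 1
          ++ PySem.List.pyRange (mp.length : Int) ((mp.length : Int) + getCount p.2) 1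
        = PySem.List.pyRange 0 ((mp ++ List.replicate (getCount p.2).toNat p.1).length : Int) 1 := by
      rw [hlen]
      exact (PySem.List.pyRange_one_append 0 (mp.length : Int) ((mp.length : Int) + getCount p.2)
        (Int.natCast_nonneg _) (by omega)).symm
    have step : (PySem.List.pyRange 0 (mp.length : Int) 1
          ++ PySem.List.pyRange (mp.length : Int) ((mp.length : Int) + getCount p.2) 1,
        mp ++ PySem.List.pyRepeat [p.1] (getCount p.2),
        (mp.length : Int) + getCount p.2)
        = (PySem.List.pyRange 0 ((mp ++ List.replicate (getCount p.2).toNat p.1).length : Int) 1,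
           mp ++ List.replicate (getCount p.2).toNat p.1,
           ((mp ++ List.replicate (getCount p.2).toNat p.1).length : Int)) := by
      rw [hrep, hrange, hlen]
    rw [step, ih (mp ++ List.replicate (getCount p.2).toNat p.1)
      (fun q hq => hl q (List.mem_cons_of_mem _ hq))
      (fun q hq => hc q (List.mem_cons_of_mem _ hq))]
    rw [mkMappings_cons, List.append_assoc]

-- a tail of nonpositive counts contributes nothing to entity_list and mappings
lemma loopTail (entities : List (String × List (String × Int))) :
    ∀ (l : List (String × List (String × Int))) (st : List Int × List String × Int),
    (∀ p ∈ l, getCount (lookupA entities p.1) ≤ 0) →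
    ∃ i' : Int,
      l.foldl
        (fun (st : List Int × List String × Int) p =>
          (st.1 ++ PySem.List.pyRange st.2.2 (st.2.2 + getCount (lookupA entities p.1)) 1,
           st.2.1 ++ PySem.List.pyRepeat [p.1] (getCount (lookupA entities p.1)),
           st.2.2 + getCount (lookupA entities p.1)))
        st
      = (st.1, st.2.1, i') := by
  intro l
  induction l with
  | nil => intro st _; exact ⟨st.2.2, rfl⟩
  | cons p t ih =>
    intro st hc
    have hc0 : getCount (lookupA entities p.1) ≤ 0 := hc p (List.mem_cons_self ..)
    have hrange : PySem.List.pyRange st.2.2 (st.2.2 + getCount (lookupA entities p.1)) 1 = [] :=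
      PySem.List.pyRange_one_eq_nil (by omega)
    have hrep : PySem.List.pyRepeat [p.1] (getCount (lookupA entities p.1)) = [] := by
      rw [PySem.List.pyRepeat_singleton, Int.toNat_eq_zero.mpr hc0, List.replicate_zero]
    simp only [List.foldl_cons, hrange, hrep, List.append_nil]
    exact ih _ (fun q hq => hc q (List.mem_cons_of_mem _ hq))

-- nonpositive counts produce no mappings
lemma mkMappings_eq_nil (l : List (String × List (String × Int)))
    (h : ∀ p ∈ l, getCount p.2 ≤ 0) : mkMappings l = [] := by
  induction l with
  | nil => rfl
  | cons p t ih =>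
    rw [mkMappings_cons, Int.toNat_eq_zero.mpr (h p (List.mem_cons_self ..)),
      List.replicate_zero, List.nil_append]
    exact ih (fun q hq => h q (List.mem_cons_of_mem _ hq))

-- after the first negative count, Pre_'s pairwise condition keeps every count nonpositive
lemma dropWhile_nonpos (l : List (String × List (String × Int)))
    (hpw : l.Pairwise (fun p q => getCount p.2 < 0 → getCount q.2 ≤ 0)) :
    ∀ p ∈ l.dropWhile (fun p => decide (0 ≤ getCount p.2)), getCount p.2 ≤ 0 := by
  induction l with
  | nil => intro p hp; simp [List.dropWhile] at hp
  | cons a t ih =>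
    rw [List.pairwise_cons] at hpw
    intro p hp
    rw [List.dropWhile_cons] at hp
    by_cases ha : (0 ≤ getCount a.2)
    · rw [if_pos (by simpa using ha)] at hp
      exact ih hpw.2 p hp
    · rw [if_neg (by simpa using ha)] at hp
      rcases List.mem_cons.mp hp with rfl | hp
      · omega
      · exact hpw.1 p hp (by omega)

-- under Pre_, A returns (range(0, len(mkMappings)), mkMappings)
lemma A_char (entities : List (String × List (String × Int)))
    (hpre : Pre_make_entity_list entities) :
    make_entity_list entities
      = (PySem.List.pyRange 0 ((mkMappings entities).length : Int) 1, mkMappings entities) := by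
  rcases hpre with ⟨hnd, _, hpw⟩
  unfold make_entity_list
  have hsplit := (List.takeWhile_append_dropWhile
    (p := fun p => decide (0 ≤ getCount p.2)) (l := entities)).symm
  have hsub1 : ∀ p ∈ entities.takeWhile (fun p => decide (0 ≤ getCount p.2)), p ∈ entities :=
    fun p hp => (List.takeWhile_sublist _).subset hp
  have hsub2 : ∀ p ∈ entities.dropWhile (fun p => decide (0 ≤ getCount p.2)), p ∈ entities :=
    fun p hp => (List.dropWhile_sublist _).subset hp
  have hlook : ∀ p ∈ entities, lookupA entities p.1 = p.2 := by
    intro p hp; simp [lookupA, find?_of_nodup entities hnd p hp]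
  have h1 := loopA entities (entities.takeWhile (fun p => decide (0 ≤ getCount p.2))) []
    (fun p hp => find?_of_nodup entities hnd p (hsub1 p hp))
    (fun p hp => by simpa using List.mem_takeWhile_imp hp)
  simp only [List.length_nil, Nat.cast_zero, PySem.List.pyRange_one_eq_nil le_rfl,
    List.nil_append] at h1
  have h2 := loopTail entities (entities.dropWhile (fun p => decide (0 ≤ getCount p.2)))
    (PySem.List.pyRange 0
      ((mkMappings (entities.takeWhile (fun p => decide (0 ≤ getCount p.2)))).length : Int) 1,
     mkMappings (entities.takeWhile (fun p => decide (0 ≤ getCount p.2))),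
     ((mkMappings (entities.takeWhile (fun p => decide (0 ≤ getCount p.2)))).length : Int))
    (fun p hp => by rw [hlook p (hsub2 p hp)]; exact dropWhile_nonpos entities hpw p hp)
  rcases h2 with ⟨i', h2⟩
  have hmk : mkMappings entities
      = mkMappings (entities.takeWhile (fun p => decide (0 ≤ getCount p.2))) := by
    conv_lhs => rw [hsplit]
    rw [show ∀ (l1 l2 : List (String × List (String × Int))),
          mkMappings (l1 ++ l2) = mkMappings l1 ++ mkMappings l2 from
        fun l1 l2 => List.flatMap_append ..,
      mkMappings_eq_nil _ (dropWhile_nonpos entities hpw), List.append_nil]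
  have hcongr := congrArg (fun l : List (String × List (String × Int)) =>
    l.foldl
      (fun (st : List Int × List String × Int) p =>
        (st.1 ++ PySem.List.pyRange st.2.2 (st.2.2 + getCount (lookupA entities p.1)) 1,
         st.2.1 ++ PySem.List.pyRepeat [p.1] (getCount (lookupA entities p.1)),
         st.2.2 + getCount (lookupA entities p.1)))
      (([] : List Int), ([] : List String), (0 : Int))) hsplit
  simp only [List.foldl_append] at hcongr
  rw [h1, h2, ← hmk] at hcongr
  simp only [hcongr]

-- B's kept counts are the positive ones; their expansion is mkMappings
lemma expand_countsOf (l : List (String × List (String × Int))) :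
    expand (countsOf l) = mkMappings l := by
  induction l with
  | nil => rfl
  | cons p t ih =>
    rw [mkMappings_cons]
    by_cases hc : 0 < getCount p.2
    · simp only [countsOf, List.filterMap_cons, if_pos hc, expand, List.flatMap_cons]
      rw [← expand, ← countsOf, ih]
    · simp only [countsOf, List.filterMap_cons, if_neg hc]
      rw [Int.toNat_eq_zero.mpr (by omega), List.replicate_zero, List.nil_append, ← countsOf, ih]

lemma countsOf_pos (l : List (String × List (String × Int))) :
    ∀ q ∈ countsOf l, 0 < q.2 := by
  intro q hq
  rcases List.mem_filterMap.mp hq with ⟨p, _, hp⟩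
  by_cases hc : 0 < getCount p.2
  · rw [if_pos hc] at hp; cases hp; exact hc
  · rw [if_neg hc] at hp; cases hp

-- the generator sum equals the expansion's length (counts all positive)
lemma totalOf_eq_length (counts : List (String × Int)) (hpos : ∀ q ∈ counts, 0 < q.2) :
    ∀ a : Int, counts.foldl (fun a q => a + q.2) a = a + ((expand counts).length : Int) := by
  induction counts with
  | nil => intro a; simp [expand]
  | cons q t ih =>
    intro a
    have hq : 0 < q.2 := hpos q (List.mem_cons_self ..)
    rw [List.foldl_cons, ih (fun r hr => hpos r (List.mem_cons_of_mem _ hr))]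
    simp only [expand, List.flatMap_cons, List.length_append, List.length_replicate]
    push_cast
    omega

-- owner finds the n-th element of the expansion
lemma owner_expand (counts : List (String × Int)) (hpos : ∀ q ∈ counts, 0 < q.2) :
    ∀ n : Nat, (hn : n < (expand counts).length) →
      owner counts (n : Int) = some ((expand counts)[n]) := by
  induction counts with
  | nil => intro n hn; simp [expand] at hn
  | cons q t ih =>
    intro n hn
    have hq : 0 < q.2 := hpos q (List.mem_cons_self ..)
    have hexp : expand (q :: t) = List.replicate q.2.toNat q.1 ++ expand t := by
      simp [expand, List.flatMap_cons]
    by_cases hlt : n < q.2.toNat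
    · have : (n : Int) < q.2 := by omega
      rw [show owner (q :: t) (n : Int) = some q.1 from by
        cases q; simp [owner, this]]
      congr 1
      simp only [hexp]
      rw [List.getElem_append_left (by simpa using hlt), List.getElem_replicate]
    · have hge : ¬ ((n : Int) < q.2) := by omega
      have hcast : (n : Int) - q.2 = ((n - q.2.toNat : Nat) : Int) := by omega
      rw [show owner (q :: t) (n : Int) = owner t ((n : Int) - q.2) from by
        cases q; simp [owner, hge]]
      rw [hcast]
      have hlen : n - q.2.toNat < (expand t).length := by
        rw [hexp, List.length_append, List.length_replicate] at hn; omega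
      rw [ih (fun r hr => hpos r (List.mem_cons_of_mem _ hr)) _ hlen]
      congr 1
      simp only [hexp]
      rw [List.getElem_append_right (by simpa using hlt)]
      simp

-- under Pre_, B returns the same pair
lemma B_char (entities : List (String × List (String × Int))) :
    make_entity_list_alt entities
      = (PySem.List.pyRange 0 ((mkMappings entities).length : Int) 1, mkMappings entities) := by
  simp only [make_entity_list_alt]
  have hpos := countsOf_pos entities
  have htot : totalOf (countsOf entities) = ((mkMappings entities).length : Int) := by
    rw [totalOf, totalOf_eq_length _ hpos 0, expand_countsOf]; ring
  rw [htot]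
  refine Prod.ext rfl ?_
  show (PySem.List.pyRange 0 ((mkMappings entities).length : Int) 1).map
      (fun j => (owner (countsOf entities) j).getD "") = mkMappings entities
  rw [PySem.List.pyRange_one]
  have hN : ((((mkMappings entities).length : Int)) - 0).toNat = (mkMappings entities).length := by
    omega
  rw [hN]
  apply List.ext_getElem
  · simp
  · intro n h1 h2
    simp only [List.getElem_map, List.getElem_range]
    have hn : n < (expand (countsOf entities)).length := by rw [expand_countsOf]; exact h2
    have := owner_expand (countsOf entities) hpos n hn
    rw [show (0 : Int) + (n : Int) = (n : Int) by ring, this, Option.getD_some]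
    simp only [expand_countsOf]

-- ===== VERDICT (by name: the statement is the Claim_ definition above) =====
theorem make_entity_list_spec : Claim_equal_make_entity_list := by
  intro entities _ hpre
  show make_entity_list entities = make_entity_list_alt entities
  rw [A_char entities hpre, B_char entities]
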